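-- pv_equiv track=rewrite | github.com/geraud-g/advent_of_code_2015-2018 | AOC-2017/Day-13/day-13.py | solve_puzzle_part_2
-- ===== SOURCE A (Python) =====
-- def has_been_caught(turn: int, scanner_range: int) -> bool:
--     if scanner_range < 1:
--         return False
--     return (turn % ((scanner_range - 1) * 2)) == 0
--
-- def solve_puzzle_part_2(firewall: [int]) -> int:
--     wait = 0
--
--     while True:
--         for step, depth in enumerate(firewall):
--             if has_been_caught(step + wait, depth):
--                 wait += 1
--                 break
--         else:
--             return wait
-- ===== SOURCE B (Python) =====
-- def solve_puzzle_part_2(firewall):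
--     # Sieve of caught delays, over windows [0, size) of doubling size:
--     # each layer (step, depth) with depth >= 2 catches exactly the delays
--     # w with (w + step) % ((depth - 1) * 2) == 0; mark those stepping by
--     # the layer's period and return the first unmarked delay.
--     size = 64
--     while True:
--         caught = set()
--         for step, depth in enumerate(firewall):
--             if depth == 1:
--                 raise ValueError("a depth-1 layer catches every packet; no delay works")
--             if depth >= 2:
--                 period = (depth - 1) * 2
--                 for w in range((-step) % period, size, period):
--                     caught.add(w)
--         for w in range(size):
--             if w not in caught:
--                 return w
--         size *= 2
-- ===== Notes on version B (the rewrite author's own statement) =====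
-- stated objective: alternative
-- what changed: A rescans every layer for each candidate delay 0,1,2,...; B sieves: per layer it marks the caught delays stepping by that layer's period over doubling windows and returns the first unmarked delay.
import Mathlib
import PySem

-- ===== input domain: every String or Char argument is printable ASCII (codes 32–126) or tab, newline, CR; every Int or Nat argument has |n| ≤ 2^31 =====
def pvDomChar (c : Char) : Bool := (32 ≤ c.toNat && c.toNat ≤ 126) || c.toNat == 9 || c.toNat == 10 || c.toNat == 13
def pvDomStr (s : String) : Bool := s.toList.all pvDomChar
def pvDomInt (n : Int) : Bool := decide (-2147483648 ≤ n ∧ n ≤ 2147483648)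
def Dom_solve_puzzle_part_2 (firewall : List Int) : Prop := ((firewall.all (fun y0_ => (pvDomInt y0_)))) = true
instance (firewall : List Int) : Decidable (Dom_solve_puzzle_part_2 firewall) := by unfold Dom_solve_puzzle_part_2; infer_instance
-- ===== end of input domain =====

-- B replaces A's rescan-all-layers-per-delay loop by a sieve: per layer, the caught
-- delays are marked stepping by the layer's period over doubling windows, and the
-- first unmarked delay is returned (objective: alternative algorithm).

-- ===== PORT A =====
def hasBeenCaught (turn : Int) (scannerRange : Int) : Bool :=
  if scannerRange < 1 then false
  else PySem.Int.mod turn ((scannerRange - 1) * 2) == 0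

-- lcm of all scanner periods: the totality fuel of both ports' loops (a safe delay,
-- if one exists, exists below it by periodicity); not part of either Python's data.
def periodLcm (firewall : List Int) : Nat :=
  firewall.foldl (fun a d => if 2 ≤ d then Nat.lcm a ((d - 1) * 2).toNat else a) 1

-- A's 'while True' loop. The for-else breaks at the first caught layer, which only
-- decides whether wait increments — ported as any. -1 is returned only at fuel
-- exhaustion, i.e. where Python A never returns (no safe delay exists).
def goA (firewall : List Int) : Nat → Int → Int
  | 0, _ => -1
  | f + 1, wait =>
    if (PySem.List.enumerate firewall).any (fun sd => hasBeenCaught (sd.1 + wait) sd.2)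
    then goA firewall f (wait + 1)
    else wait

def solve_puzzle_part_2 (firewall : List Int) : Int :=
  goA firewall (periodLcm firewall) 0

-- ===== PORT B =====
-- one window [0, size): mark every caught delay of every layer, stepping by the period
def sieveCaught (firewall : List Int) (size : Int) : PySem.Set Int :=
  (PySem.List.enumerate firewall).foldl
    (fun caught sd =>
      if sd.2 == 1 then caught   -- Python B raises ValueError here; excluded by Pre_
      else if 2 ≤ sd.2 then
        (PySem.List.pyRange (PySem.Int.mod (-sd.1) ((sd.2 - 1) * 2)) size ((sd.2 - 1) * 2)).foldl
          PySem.Set.add caught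
      else caught)
    PySem.Set.empty

-- B's 'while True' loop over doubling window sizes; -1 only at fuel exhaustion,
-- i.e. where Python B never returns (no safe delay exists).
def goB (firewall : List Int) : Nat → Int → Int
  | 0, _ => -1
  | f + 1, size =>
    let caught := sieveCaught firewall size
    match (PySem.List.pyRange 0 size 1).find? (fun w => !(PySem.Set.contains caught w)) with
    | some w => w
    | none => goB firewall f (size * 2)

def solve_puzzle_part_2_alt (firewall : List Int) : Int :=
  goB firewall (periodLcm firewall + 1) 64

-- ===== PRECONDITION & SPEC =====
-- Pre_ excludes only lists containing a depth of exactly 1: there Python A raises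
-- ZeroDivisionError (turn % 0) whenever that layer is inspected, and never returns.
def Pre_solve_puzzle_part_2 (firewall : List Int) : Prop := ∀ d ∈ firewall, d ≠ 1
instance (firewall : List Int) : Decidable (Pre_solve_puzzle_part_2 firewall) := by unfold Pre_solve_puzzle_part_2; infer_instance
def pvWitness_solve_puzzle_part_2 : List Int := [3, 2]
def Spec_solve_puzzle_part_2 (firewall : List Int) (out : Int) : Prop := out = solve_puzzle_part_2_alt firewall
instance (firewall : List Int) (out : Int) : Decidable (Spec_solve_puzzle_part_2 firewall out) := by unfold Spec_solve_puzzle_part_2; infer_instance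

-- ===== CLAIM (what is proved, stated in full; the proofs are below) =====
def Claim_equal_solve_puzzle_part_2 : Prop := ∀ (firewall : List Int), Dom_solve_puzzle_part_2 firewall → Pre_solve_puzzle_part_2 firewall → Spec_solve_puzzle_part_2 firewall (solve_puzzle_part_2 firewall)

-- ===== LEMMAS AND PROOFS =====

-- layer i catches the packet delayed by x
def BadAt (firewall : List Int) (x : Int) : Prop :=
  ∃ i : Nat, i < firewall.length ∧ 2 ≤ firewall.getD i 0 ∧
    (firewall.getD i 0 - 1) * 2 ∣ ((i : Int) + x)

-- o is the least nonnegative safe delay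
def LeastSafe (firewall : List Int) (o : Int) : Prop :=
  0 ≤ o ∧ ¬ BadAt firewall o ∧ ∀ y, 0 ≤ y → y < o → BadAt firewall y

theorem leastSafe_unique {fw : List Int} {o₁ o₂ : Int}
    (h₁ : LeastSafe fw o₁) (h₂ : LeastSafe fw o₂) : o₁ = o₂ := by
  rcases h₁ with ⟨a₁, b₁, c₁⟩
  rcases h₂ with ⟨a₂, b₂, c₂⟩
  rcases lt_trichotomy o₁ o₂ with h | h | h
  · exact absurd (c₂ o₁ a₁ h) b₁
  · exact h
  · exact absurd (c₁ o₂ a₂ h) b₂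

theorem getD_mem_of_lt {fw : List Int} {i : Nat} (hi : i < fw.length) :
    fw.getD i 0 ∈ fw := by
  rw [List.getD_eq_getElem?_getD, List.getElem?_eq_getElem hi]
  exact List.getElem_mem hi

theorem hasBeenCaught_iff {fw : List Int} (H : ∀ d ∈ fw, d ≠ 1) {i : Nat}
    (hi : i < fw.length) (x : Int) :
    hasBeenCaught ((i : Int) + x) (fw.getD i 0) = true ↔
      (2 ≤ fw.getD i 0 ∧ (fw.getD i 0 - 1) * 2 ∣ ((i : Int) + x)) := by
  have hne : fw.getD i 0 ≠ 1 := H _ (getD_mem_of_lt hi)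
  unfold hasBeenCaught
  split_ifs with h
  · simp only [false_iff]
    rintro ⟨h2, -⟩
    omega
  · rw [beq_iff_eq, PySem.Int.mod_eq_zero_iff_dvd]
    constructor
    · intro hd; exact ⟨by omega, hd⟩
    · intro hd; exact hd.2

theorem any_iff_bad {fw : List Int} (H : ∀ d ∈ fw, d ≠ 1) (w : Int) :
    ((PySem.List.enumerate fw).any (fun sd => hasBeenCaught (sd.1 + w) sd.2) = true)
      ↔ BadAt fw w := by
  rw [PySem.List.enumerate_eq_map_pyRange fw 0]
  rw [List.any_map, List.any_eq_true]
  unfold BadAt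
  constructor
  · rintro ⟨j, hj, hc⟩
    rw [PySem.List.mem_pyRange_one, PySem.List.len_eq] at hj
    simp only [Function.comp] at hc
    rw [PySem.List.pyGetD_of_nonneg fw 0 hj.1] at hc
    have hjn : j.toNat < fw.length := by omega
    have hcast : ((j.toNat : Int)) = j := by omega
    rw [← hcast] at hc
    exact ⟨j.toNat, hjn, (hasBeenCaught_iff H hjn w).mp hc⟩
  · rintro ⟨i, hi, hprop⟩
    refine ⟨(i : Int), ?_, ?_⟩
    · rw [PySem.List.mem_pyRange_one, PySem.List.len_eq]
      constructor <;> [positivity; exact_mod_cast hi]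
    · simp only [Function.comp]
      rw [PySem.List.pyGetD_of_nonneg fw 0 (by positivity), Int.toNat_natCast]
      exact (hasBeenCaught_iff H hi w).mpr hprop

theorem mem_foldl_add (l : List Int) (s : PySem.Set Int) (x : Int) :
    x ∈ l.foldl PySem.Set.add s ↔ x ∈ s ∨ x ∈ l := by
  induction l generalizing s with
  | nil => simp
  | cons a l ih =>
    simp [List.foldl_cons, ih, PySem.Set.mem_add]
    tauto

theorem range_hit_iff {j p : Int} (hp : 0 < p) (size x : Int) :
    x ∈ PySem.List.pyRange (PySem.Int.mod (-j) p) size p ↔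
      (0 ≤ x ∧ x < size ∧ p ∣ (j + x)) := by
  rw [PySem.List.mem_pyRange_iff_of_pos hp]
  set s := PySem.Int.mod (-j) p with hs
  have hs0 : 0 ≤ s := PySem.Int.mod_nonneg _ hp
  have hsp : s < p := PySem.Int.mod_lt _ hp
  have hsj : p ∣ s + j := by
    refine ⟨-(PySem.Int.floordiv (-j) p), ?_⟩
    have := PySem.Int.floordiv_mul_add_mod (-j) p
    rw [← hs] at this
    linarith
  constructor
  · rintro ⟨h1, h2, t, ht⟩
    refine ⟨by omega, h2, ?_⟩
    have hrw : j + x = (s + j) + (x - s) := by ring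
    rw [hrw, ht]
    exact dvd_add hsj ⟨t, rfl⟩
  · rintro ⟨h0, h2, hd⟩
    have hxs : p ∣ x - s := by
      have hrw : x - s = (j + x) - (s + j) := by ring
      rw [hrw]
      exact dvd_sub hd hsj
    obtain ⟨t, ht⟩ := hxs
    have ht0 : 0 ≤ t := by nlinarith
    exact ⟨by nlinarith, h2, t, ht⟩

theorem mem_sieve_aux (size : Int) :
    ∀ (l : List (Int × Int)) (c : PySem.Set Int) (x : Int),
      x ∈ l.foldl
        (fun caught sd =>
          if sd.2 == 1 then caught
          else if 2 ≤ sd.2 then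
            (PySem.List.pyRange (PySem.Int.mod (-sd.1) ((sd.2 - 1) * 2)) size ((sd.2 - 1) * 2)).foldl
              PySem.Set.add caught
          else caught) c
      ↔ x ∈ c ∨ ∃ sd ∈ l, (sd.2 ≠ 1 ∧ 2 ≤ sd.2 ∧
          x ∈ PySem.List.pyRange (PySem.Int.mod (-sd.1) ((sd.2 - 1) * 2)) size ((sd.2 - 1) * 2)) := by
  intro l
  induction l with
  | nil => intro c x; simp
  | cons sd l ih =>
    intro c x
    rw [List.foldl_cons, ih]
    rw [List.exists_mem_cons_iff]
    split_ifs with h1 h2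
    · rw [beq_iff_eq] at h1
      simp [h1]
    · rw [beq_iff_eq] at h1
      rw [mem_foldl_add]
      tauto
    · tauto

theorem mem_sieve {fw : List Int} (size x : Int) :
    x ∈ sieveCaught fw size ↔ (0 ≤ x ∧ x < size ∧ BadAt fw x) := by
  unfold sieveCaught
  rw [mem_sieve_aux, PySem.List.enumerate_eq_map_pyRange fw 0]
  simp only [PySem.Set.empty, List.not_mem_nil, false_or]
  constructor
  · rintro ⟨sd, hsd, hne, h2, hmem⟩
    obtain ⟨j, hj, rfl⟩ := List.mem_map.mp hsd
    rw [PySem.List.mem_pyRange_one, PySem.List.len_eq] at hj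
    dsimp only at hne h2 hmem
    rw [PySem.List.pyGetD_of_nonneg fw 0 hj.1] at hne h2 hmem
    have hjn : j.toNat < fw.length := by omega
    have hp : (0 : Int) < (fw.getD j.toNat 0 - 1) * 2 := by omega
    obtain ⟨h0, hsz, hdvd⟩ := (range_hit_iff hp size x).mp hmem
    refine ⟨h0, hsz, j.toNat, hjn, h2, ?_⟩
    have : ((j.toNat : Int)) = j := by omega
    rw [this]
    exact hdvd
  · rintro ⟨h0, hsz, i, hi, h2, hdvd⟩
    refine ⟨((i : Int), PySem.List.pyGetD fw (i : Int) 0), List.mem_map.mpr ⟨(i : Int), ?_, rfl⟩, ?_⟩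
    · rw [PySem.List.mem_pyRange_one, PySem.List.len_eq]
      constructor <;> [positivity; exact_mod_cast hi]
    · rw [PySem.List.pyGetD_of_nonneg fw 0 (by positivity), Int.toNat_natCast]
      have hp : (0 : Int) < (fw.getD i 0 - 1) * 2 := by omega
      exact ⟨by omega, h2, (range_hit_iff hp size x).mpr ⟨h0, hsz, hdvd⟩⟩

theorem find_range_some {p : Int → Bool} {x : Int} :
    ∀ (n : Nat) (a b : Int), (b - a).toNat = n →
      (PySem.List.pyRange a b 1).find? p = some x →
      a ≤ x ∧ x < b ∧ p x = true ∧ ∀ y, a ≤ y → y < x → p y = false := by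
  intro n
  induction n with
  | zero =>
    intro a b hn hf
    rw [PySem.List.pyRange_one_eq_nil (by omega)] at hf
    simp at hf
  | succ n ih =>
    intro a b hn hf
    rw [PySem.List.pyRange_one_cons (by omega)] at hf
    by_cases hpa : p a = true
    · rw [List.find?_cons_of_pos hpa] at hf
      obtain rfl : a = x := by injection hf
      exact ⟨le_rfl, by omega, hpa, fun y h1 h2 => by omega⟩
    · rw [List.find?_cons_of_neg (by simpa using hpa)] at hf
      obtain ⟨h1, h2, h3, h4⟩ := ih (a + 1) b (by omega) hf
      refine ⟨by omega, h2, h3, fun y hy1 hy2 => ?_⟩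
      rcases eq_or_lt_of_le hy1 with rfl | hlt
      · simpa using hpa
      · exact h4 y (by omega) hy2

theorem contains_iff (s : PySem.Set Int) (x : Int) :
    PySem.Set.contains s x = true ↔ x ∈ s := by
  simp [PySem.Set.contains]

theorem goA_least {fw : List Int} (H : ∀ d ∈ fw, d ≠ 1) :
    ∀ (f : Nat) (w : Int), 0 ≤ w →
      (∃ k : Nat, k < f ∧ ¬ BadAt fw (w + k)) →
      (0 ≤ goA fw f w ∧ ¬ BadAt fw (goA fw f w) ∧
        ∀ y, w ≤ y → y < goA fw f w → BadAt fw y) := by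
  intro f
  induction f with
  | zero => intro w _ ⟨k, hk, _⟩; omega
  | succ f ih =>
    intro w hw ⟨k, hk, hsafe⟩
    rw [goA]
    by_cases hany : ((PySem.List.enumerate fw).any
        (fun sd => hasBeenCaught (sd.1 + w) sd.2) = true)
    · rw [if_pos hany]
      have hbadw : BadAt fw w := (any_iff_bad H w).mp hany
      have hk0 : k ≠ 0 := by
        rintro rfl; simp at hsafe; exact hsafe hbadw
      have := ih (w + 1) (by omega)
        ⟨k - 1, by omega, by
          have : w + 1 + ((k - 1 : Nat) : Int) = w + (k : Int) := by omega
          rw [this]; exact hsafe⟩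
      refine ⟨this.1, this.2.1, fun y hy1 hy2 => ?_⟩
      rcases eq_or_lt_of_le hy1 with rfl | hlt
      · exact hbadw
      · exact this.2.2 y (by omega) hy2
    · rw [if_neg hany]
      refine ⟨hw, fun hb => hany ((any_iff_bad H w).mpr hb), fun y h1 h2 => by omega⟩

theorem goA_exhaust {fw : List Int} (H : ∀ d ∈ fw, d ≠ 1)
    (hall : ∀ y : Int, 0 ≤ y → BadAt fw y) :
    ∀ (f : Nat) (w : Int), 0 ≤ w → goA fw f w = -1 := by
  intro f
  induction f with
  | zero => intro w _; rfl
  | succ f ih =>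
    intro w hw
    rw [goA, if_pos ((any_iff_bad H w).mpr (hall w hw))]
    exact ih (w + 1) (by omega)

theorem goB_round_some {fw : List Int} {size w : Int}
    (hf : (PySem.List.pyRange 0 size 1).find?
        (fun w => !(PySem.Set.contains (sieveCaught fw size) w)) = some w) :
    LeastSafe fw w := by
  obtain ⟨h1, h2, h3, h4⟩ := find_range_some (size - 0).toNat 0 size rfl hf
  refine ⟨h1, ?_, fun y hy1 hy2 => ?_⟩
  · intro hbad
    have hmem : w ∈ sieveCaught fw size := (mem_sieve size w).mpr ⟨h1, h2, hbad⟩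
    rw [Bool.not_eq_true'] at h3
    exact absurd ((contains_iff _ _).mpr hmem) (by rw [h3]; simp)
  · have hy := h4 y hy1 hy2
    rw [Bool.not_eq_false'] at hy
    rw [contains_iff] at hy
    exact ((mem_sieve size y).mp hy).2.2

theorem goB_round_none {fw : List Int} {size : Int}
    (hf : (PySem.List.pyRange 0 size 1).find?
        (fun w => !(PySem.Set.contains (sieveCaught fw size) w)) = none)
    {y : Int} (hy0 : 0 ≤ y) (hy1 : y < size) : BadAt fw y := by
  rw [List.find?_eq_none] at hf
  have hmem := hf y (PySem.List.mem_pyRange_one.mpr ⟨hy0, hy1⟩)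
  have hc : PySem.Set.contains (sieveCaught fw size) y = true := by
    simpa using hmem
  rw [contains_iff] at hc
  exact ((mem_sieve size y).mp hc).2.2

theorem goB_least {fw : List Int} :
    ∀ (f : Nat) (size : Int), 0 < size →
      (∃ k : Int, 0 ≤ k ∧ k < size + f ∧ ¬ BadAt fw k) →
      LeastSafe fw (goB fw (f + 1) size) := by
  intro f
  induction f with
  | zero =>
    intro size hsz ⟨k, hk0, hklt, hsafe⟩
    rw [goB]
    cases hfind : (PySem.List.pyRange 0 size 1).find?
        (fun w => !(PySem.Set.contains (sieveCaught fw size) w)) with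
    | some w => exact goB_round_some hfind
    | none =>
      exact absurd (goB_round_none hfind hk0 (by omega)) hsafe
  | succ f ih =>
    intro size hsz ⟨k, hk0, hklt, hsafe⟩
    rw [goB]
    cases hfind : (PySem.List.pyRange 0 size 1).find?
        (fun w => !(PySem.Set.contains (sieveCaught fw size) w)) with
    | some w => exact goB_round_some hfind
    | none =>
      show LeastSafe fw (goB fw (f + 1) (size * 2))
      have hkge : size ≤ k := by
        by_contra hlt
        exact hsafe (goB_round_none hfind hk0 (by omega))
      exact ih (size * 2) (by omega) ⟨k, hk0, by omega, hsafe⟩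

theorem goB_exhaust {fw : List Int}
    (hall : ∀ y : Int, 0 ≤ y → BadAt fw y) :
    ∀ (f : Nat) (size : Int), 0 < size → goB fw f size = -1 := by
  intro f
  induction f with
  | zero => intro size _; rfl
  | succ f ih =>
    intro size hsz
    rw [goB]
    have hfind : (PySem.List.pyRange 0 size 1).find?
        (fun w => !(PySem.Set.contains (sieveCaught fw size) w)) = none := by
      rw [List.find?_eq_none]
      intro y hy
      rw [PySem.List.mem_pyRange_one] at hy
      simp only [Bool.not_eq_true, Bool.not_eq_false', contains_iff]
      exact (mem_sieve size y).mpr ⟨hy.1, hy.2, hall y hy.1⟩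
    rw [hfind]
    exact ih (size * 2) (by omega)

theorem foldl_lcm_pos (l : List Int) :
    ∀ a : Nat, 0 < a →
      0 < l.foldl (fun a d => if 2 ≤ d then Nat.lcm a ((d - 1) * 2).toNat else a) a := by
  induction l with
  | nil => intro a ha; exact ha
  | cons d l ih =>
    intro a ha
    rw [List.foldl_cons]
    refine ih _ ?_
    split_ifs with h
    · exact Nat.lcm_pos ha (by omega)
    · exact ha

theorem periodLcm_pos (fw : List Int) : 0 < periodLcm fw :=
  foldl_lcm_pos fw 1 (by omega)

theorem foldl_lcm_dvd (l : List Int) :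
    ∀ a : Nat,
      (a ∣ l.foldl (fun a d => if 2 ≤ d then Nat.lcm a ((d - 1) * 2).toNat else a) a) ∧
      ∀ d ∈ l, 2 ≤ d →
        ((d - 1) * 2).toNat ∣
          l.foldl (fun a d => if 2 ≤ d then Nat.lcm a ((d - 1) * 2).toNat else a) a := by
  induction l with
  | nil => intro a; exact ⟨dvd_refl a, by simp⟩
  | cons e l ih =>
    intro a
    rw [List.foldl_cons]
    refine ⟨?_, ?_⟩
    · refine dvd_trans ?_ (ih _).1
      split_ifs with h
      · exact Nat.dvd_lcm_left _ _
      · exact dvd_refl a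
    · intro d hd h2
      rcases List.mem_cons.mp hd with rfl | hd
      · refine dvd_trans ?_ (ih _).1
        rw [if_pos h2]
        exact Nat.dvd_lcm_right _ _
      · exact (ih _).2 d hd h2

theorem dvd_periodLcm {fw : List Int} {i : Nat} (hi : i < fw.length)
    (hd : 2 ≤ fw.getD i 0) : ((fw.getD i 0 - 1) * 2).toNat ∣ periodLcm fw :=
  (foldl_lcm_dvd fw 1).2 _ (getD_mem_of_lt hi) hd

theorem bad_periodic {fw : List Int}
    (hall : ∀ w : Nat, w < periodLcm fw → BadAt fw (w : Int)) :
    ∀ x : Int, 0 ≤ x → BadAt fw x := by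
  intro x hx
  have hL : (0 : Int) < (periodLcm fw : Int) := by
    exact_mod_cast periodLcm_pos fw
  set L : Int := (periodLcm fw : Int) with hLdef
  have hr0 : 0 ≤ x % L := Int.emod_nonneg x (by omega)
  have hrL : x % L < L := Int.emod_lt_of_pos x hL
  have hrn : ((x % L).toNat : Int) = x % L := by omega
  obtain ⟨i, hi, h2, hdvd⟩ := hall (x % L).toNat (by omega)
  rw [hrn] at hdvd
  refine ⟨i, hi, h2, ?_⟩
  have hpL : (fw.getD i 0 - 1) * 2 ∣ L := by
    have := dvd_periodLcm hi h2
    have hc : (((fw.getD i 0 - 1) * 2).toNat : Int) = (fw.getD i 0 - 1) * 2 := by omega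
    rw [← hc, hLdef]
    exact_mod_cast this
  have hLd : L ∣ x - x % L := by
    refine ⟨x / L, ?_⟩
    rw [Int.emod_def]
    ring
  have hsum : (i : Int) + x = ((i : Int) + x % L) + (x - x % L) := by ring
  rw [hsum]
  exact dvd_add hdvd (dvd_trans hpL hLd)

-- ===== VERDICT (by name: the statement is the Claim_ definition above) =====
theorem solve_puzzle_part_2_spec : Claim_equal_solve_puzzle_part_2 := by
  intro fw _ hpre
  unfold Spec_solve_puzzle_part_2 solve_puzzle_part_2 solve_puzzle_part_2_alt
  by_cases hex : ∃ k : Nat, k < periodLcm fw ∧ ¬ BadAt fw (k : Int)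
  · obtain ⟨k, hk, hsafe⟩ := hex
    have hA := goA_least hpre (periodLcm fw) 0 le_rfl ⟨k, hk, by simpa using hsafe⟩
    have hAls : LeastSafe fw (goA fw (periodLcm fw) 0) :=
      ⟨hA.1, hA.2.1, fun y hy => hA.2.2 y hy⟩
    have hB := goB_least (periodLcm fw) 64 (by norm_num)
      ⟨(k : Int), by positivity, by omega, hsafe⟩
    exact leastSafe_unique hAls hB
  · push Not at hex
    have hall : ∀ x : Int, 0 ≤ x → BadAt fw x :=
      bad_periodic (fun w hw => hex w hw)
    rw [goA_exhaust hpre hall _ 0 le_rfl, goB_exhaust hall _ 64 (by norm_num)]
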